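-- pv_equiv track=rewrite | github.com/Rishu5kumar/The_Joy_of_Computing-_using_Python | flames.py | flames_game
-- ===== SOURCE A (Python) =====
-- def flames_game(count):
--     result = ['Friends', 'Love', 'Affection', 'Marriage', 'Enemy', 'Siblings']
--     while len(result) > 1:
--         split_index = (count % len(result)) - 1
--         if split_index >= 0:
--             result = result[split_index+1:] + result[:split_index]
--         else:
--             result = result[:len(result)-1]
--     return result[0]
-- ===== SOURCE B (Python) =====
-- def flames_game(count):
--     j = 0
--     for i in range(2, 7):
--         j = (j + count) % i
--     return ['Friends', 'Love', 'Affection', 'Marriage', 'Enemy', 'Siblings'][j]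
-- ===== Notes on version B (the rewrite author's own statement) =====
-- stated objective: simpler
-- what changed: Replaces the list-rebuilding elimination loop with the closed-form Josephus recurrence j=(j+count)%i for i=2..6 and a single index into the fixed name list.
import Mathlib
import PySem

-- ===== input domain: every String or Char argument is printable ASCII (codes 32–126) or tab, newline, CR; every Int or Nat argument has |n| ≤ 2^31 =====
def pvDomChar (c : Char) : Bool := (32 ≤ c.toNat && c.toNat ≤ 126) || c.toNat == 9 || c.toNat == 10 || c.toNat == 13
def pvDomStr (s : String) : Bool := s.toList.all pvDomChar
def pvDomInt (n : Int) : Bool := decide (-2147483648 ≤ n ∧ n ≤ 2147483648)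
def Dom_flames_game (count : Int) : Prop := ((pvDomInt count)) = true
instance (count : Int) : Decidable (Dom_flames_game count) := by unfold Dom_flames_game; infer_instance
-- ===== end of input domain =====

-- B replaces A's list-rebuilding elimination loop with the Josephus recurrence on an index (simpler: pure integer arithmetic, no list rebuilding).

-- ===== PORT A =====
-- while loop ported with fuel 6 (the list starts at length 6 and shrinks every round, so the guard `len > 1` is reached with fuel to spare)
def flamesLoopA : Nat → Int → List String → List String
  | 0, _, res => res
  | f + 1, count, res =>
    if res.length > 1 then
      let n : Int := (res.length : Int)
      let splitIndex : Int := PySem.Int.mod count n - 1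
      if splitIndex ≥ 0 then
        flamesLoopA f count
          (PySem.List.slice res (some (splitIndex + 1)) none ++ PySem.List.slice res none (some splitIndex))
      else
        flamesLoopA f count (PySem.List.slice res none (some (n - 1)))
    else res

def flames_game (count : Int) : String :=
  (PySem.List.pyGet? (flamesLoopA 6 count ["Friends", "Love", "Affection", "Marriage", "Enemy", "Siblings"]) 0).getD ""

-- ===== PORT B =====
def flames_game_alt (count : Int) : String :=
  let j := (PySem.List.pyRange 2 7 1).foldl (fun j i => PySem.Int.mod (j + count) i) 0
  (PySem.List.pyGet? ["Friends", "Love", "Affection", "Marriage", "Enemy", "Siblings"] j).getD ""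

-- ===== PRECONDITION & SPEC =====
def Spec_flames_game (count : Int) (out : String) : Prop := out = flames_game_alt count
instance (count : Int) (out : String) : Decidable (Spec_flames_game count out) := by unfold Spec_flames_game; infer_instance

-- ===== CLAIM (what is proved, stated in full; the proofs are below) =====
def Claim_equal_flames_game : Prop := ∀ (count : Int), Dom_flames_game count → Spec_flames_game count (flames_game count)

-- ===== LEMMAS AND PROOFS =====

-- every divisor length 2..6 of the rounds divides 60, so A's loop depends on count only through count % 60
theorem flamesLoopA_period (f : Nat) (c r : Int) (res : List String)
    (h : c % 60 = r % 60) (hlen : res.length ≤ 6) :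
    flamesLoopA f c res = flamesLoopA f r res := by
  induction f generalizing res with
  | zero => rfl
  | succ f ih =>
    unfold flamesLoopA
    by_cases hg : res.length > 1
    · simp only [hg, if_true]
      have hn2 : (2 : Int) ≤ (res.length : Int) := by exact_mod_cast hg
      have hn6 : ((res.length : Int)) ≤ 6 := by exact_mod_cast hlen
      have hpos : (0 : Int) < (res.length : Int) := by omega
      have hmodeq : PySem.Int.mod c (res.length : Int) = PySem.Int.mod r (res.length : Int) := by
        rw [PySem.Int.mod_eq_emod_of_pos hpos, PySem.Int.mod_eq_emod_of_pos hpos]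
        have : ((res.length : Int)) = 2 ∨ ((res.length : Int)) = 3 ∨ ((res.length : Int)) = 4 ∨
            ((res.length : Int)) = 5 ∨ ((res.length : Int)) = 6 := by omega
        rcases this with h' | h' | h' | h' | h' <;> rw [h'] <;> omega
      rw [hmodeq]
      set s : Int := PySem.Int.mod r (res.length : Int) - 1 with hs
      have hsbound : s < (res.length : Int) - 1 ∧ -1 ≤ s := by
        rw [hs, PySem.Int.mod_eq_emod_of_pos hpos]
        have := Int.emod_lt_of_pos r hpos
        have := Int.emod_nonneg r (by omega : ((res.length : Int)) ≠ 0)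
        omega
      by_cases hsp : s ≥ 0
      · simp only [hsp, if_true]
        apply ih
        have h1 : (PySem.List.slice res (some (s + 1)) none) = res.drop (s + 1).toNat :=
          PySem.List.slice_from res (by omega)
        have h2 : (PySem.List.slice res none (some s)) = res.take s.toNat :=
          PySem.List.slice_to res (by omega)
        rw [h1, h2]
        simp only [List.length_append, List.length_drop, List.length_take]
        omega
      · simp only [hsp, if_false]
        apply ih
        have h2 : (PySem.List.slice res none (some ((res.length : Int) - 1))) =
            res.take ((res.length : Int) - 1).toNat :=
          PySem.List.slice_to res (by omega)
        rw [h2]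
        simp only [List.length_take]
        omega
    · simp only [hg, if_false]

theorem flames_game_period (c : Int) : flames_game c = flames_game (c % 60) := by
  unfold flames_game
  rw [flamesLoopA_period 6 c (c % 60) _ (by omega) (by decide)]

theorem foldB_period (c : Int) :
    (PySem.List.pyRange 2 7 1).foldl (fun j i => PySem.Int.mod (j + c) i) 0 =
    (PySem.List.pyRange 2 7 1).foldl (fun j i => PySem.Int.mod (j + c % 60) i) 0 := by
  have hr : PySem.List.pyRange 2 7 1 = ([2, 3, 4, 5, 6] : List Int) := by decide
  rw [hr]
  simp only [List.foldl]
  rw [PySem.Int.mod_eq_emod_of_pos (by omega : (0:Int) < 2),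
      PySem.Int.mod_eq_emod_of_pos (by omega : (0:Int) < 2)]
  have h2 : (0 + c) % 2 = (0 + c % 60) % 2 := by omega
  rw [h2]
  rw [PySem.Int.mod_eq_emod_of_pos (by omega : (0:Int) < 3),
      PySem.Int.mod_eq_emod_of_pos (by omega : (0:Int) < 3)]
  have h3 : ((0 + c % 60) % 2 + c) % 3 = ((0 + c % 60) % 2 + c % 60) % 3 := by omega
  rw [h3]
  rw [PySem.Int.mod_eq_emod_of_pos (by omega : (0:Int) < 4),
      PySem.Int.mod_eq_emod_of_pos (by omega : (0:Int) < 4)]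
  have h4 : (((0 + c % 60) % 2 + c % 60) % 3 + c) % 4 =
      (((0 + c % 60) % 2 + c % 60) % 3 + c % 60) % 4 := by omega
  rw [h4]
  rw [PySem.Int.mod_eq_emod_of_pos (by omega : (0:Int) < 5),
      PySem.Int.mod_eq_emod_of_pos (by omega : (0:Int) < 5)]
  have h5 : ((((0 + c % 60) % 2 + c % 60) % 3 + c % 60) % 4 + c) % 5 =
      ((((0 + c % 60) % 2 + c % 60) % 3 + c % 60) % 4 + c % 60) % 5 := by omega
  rw [h5]
  rw [PySem.Int.mod_eq_emod_of_pos (by omega : (0:Int) < 6),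
      PySem.Int.mod_eq_emod_of_pos (by omega : (0:Int) < 6)]
  omega

theorem flames_game_alt_period (c : Int) : flames_game_alt c = flames_game_alt (c % 60) := by
  unfold flames_game_alt
  rw [foldB_period c]

-- A = B on all 60 residues mod 60
theorem flames_eq_residues : ∀ r : Int, 0 ≤ r → r < 60 → flames_game r = flames_game_alt r := by
  decide

-- ===== VERDICT (by name: the statement is the Claim_ definition above) =====
theorem flames_game_spec : Claim_equal_flames_game := by
  intro count _
  unfold Spec_flames_game
  rw [flames_game_period count, flames_game_alt_period count]
  exact flames_eq_residues (count % 60) (Int.emod_nonneg _ (by omega)) (Int.emod_lt_of_pos _ (by omega))
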